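-- pv_equiv track=rewrite | github.com/Alejanker/Second_essay | parse_mol.py | parse_mol
-- ===== SOURCE A (Python) =====
-- def parse_mol(formula, i=0):
--     number = None
--
--     name = ''
--     mol = {}
--
--     temporal = 0
--
--     while i < len(formula):
--         it = formula[i]
--
--         if it in (')', ']', '}'):
--             if i + 1 < len(formula):
--                 for idx in formula[i+1:]:
--                     if idx.isdigit():
--                         if number == None:
--                             number = idx
--                         else:
--                             number += idx
--                         i += 1
--                     else:
--                         break
--
--             if number == None:
--                 return mol, i
--             else:
--                 number = int(number)
--
--                 for idx in mol:
--                     mol[idx] *= number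
--
--                 return mol, i
--
--         elif it in ('(' , '[', '{'):
--             second , i = parse_mol(formula, i+1)
--
--             for idx in second:
--                 if idx in mol:
--                     mol[idx] += second[idx]
--                 else:
--                     mol[idx] = second[idx]
--
--         elif it.isdigit():
--             number = ''
--             for idx in formula[i:]:
--                 if idx.isdigit():
--                     number += idx
--                     i += 1
--                 else:
--                     break
--
--             number = int(number)
--             valor = number + (mol[name] if name in mol else 0)
--
--             if temporal == 1:
--                 valor -= 1
--
--             mol[name] = valor
--
--             number = None
--             temporal = 0
--             continue
--
--         else:
--             valor = 1
--             for idx in formula[i:]: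
--                 if idx.isupper() and valor:
--                     name = idx
--                     valor -= 1
--                 elif idx.islower():
--                     name += idx
--                     i += 1
--                 else:
--                     break
--
--             mol[name] = (mol[name] if name in mol else 0) + 1
--             temporal = 1
--
--         i += 1
--
--     return mol, i
-- ===== SOURCE B (Python) =====
-- def parse_mol(formula, i=0):
--     # Iterative re-implementation: explicit stack of enclosing-group frames
--     # instead of recursion, and index arithmetic instead of repeated slicing.
--     n = len(formula)
--     stack = []              # frames (mol, name, temporal) of enclosing groups
--     mol = {}
--     name = ''
--     temporal = 0
--
--     while i < n:
--         c = formula[i]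
--
--         if c in (')', ']', '}'):
--             j = i + 1
--             while j < n and formula[j].isdigit():
--                 j += 1
--             if j > i + 1:                     # multiplier digits present
--                 m = int(formula[i + 1:j])
--                 for k in mol:
--                     mol[k] *= m
--                 i = j - 1                     # index of last digit
--             if not stack:
--                 return mol, i
--             parent, name, temporal = stack.pop()
--             for k, v in mol.items():
--                 parent[k] = parent.get(k, 0) + v
--             mol = parent
--
--         elif c in ('(', '[', '{'):
--             stack.append((mol, name, temporal))
--             mol = {}
--             name = ''
--             temporal = 0
--
--         elif c.isdigit():
--             j = i
--             while j < n and formula[j].isdigit():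
--                 j += 1
--             val = int(formula[i:j]) + mol.get(name, 0)
--             if temporal == 1:
--                 val -= 1
--             mol[name] = val
--             temporal = 0
--             i = j
--             continue
--
--         else:
--             j = i
--             seen_upper = False
--             parts = [name]          # collected pieces, joined once (linear-time append)
--             while j < n:
--                 ch = formula[j]
--                 if ch.isupper() and not seen_upper:
--                     parts = [ch]
--                     seen_upper = True
--                 elif ch.islower():
--                     parts.append(ch)
--                     i += 1
--                 else:
--                     break
--                 j += 1
--             name = ''.join(parts)
--             mol[name] = mol.get(name, 0) + 1
--             temporal = 1
--
--         i += 1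
--
--     # end of string inside unclosed groups: unwind like the recursion does
--     while stack:
--         parent, name, temporal = stack.pop()
--         for k, v in mol.items():
--             parent[k] = parent.get(k, 0) + v
--         mol = parent
--         i += 1
--     return mol, i
-- ===== Notes on version B (the rewrite author's own statement) =====
-- stated objective: alternative
-- what changed: Recursive descent with repeated suffix slicing is replaced by a single index-based pass that keeps an explicit stack of enclosing-group frames and slices only the digit runs it converts.
-- outside the precondition, e.g. on parse_mol('9', -1): A returns ({'': 18}, 1), B returns ({'': 9}, 1)
import Mathlib
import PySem

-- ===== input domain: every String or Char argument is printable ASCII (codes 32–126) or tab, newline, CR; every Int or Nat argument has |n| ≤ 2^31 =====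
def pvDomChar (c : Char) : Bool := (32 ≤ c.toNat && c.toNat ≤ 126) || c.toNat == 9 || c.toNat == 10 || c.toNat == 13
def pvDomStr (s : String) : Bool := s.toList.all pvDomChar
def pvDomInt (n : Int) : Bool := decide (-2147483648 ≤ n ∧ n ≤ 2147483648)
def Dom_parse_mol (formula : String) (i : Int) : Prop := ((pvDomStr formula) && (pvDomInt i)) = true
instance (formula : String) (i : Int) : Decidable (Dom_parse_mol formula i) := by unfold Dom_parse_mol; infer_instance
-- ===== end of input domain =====

-- B replaces A's recursion and repeated whole-suffix slicing by one index-based pass with an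
-- explicit stack of group frames (objective: alternative structure, not measured faster).

-- ===== PORT A =====
-- shared helper (the very same loop appears in both sources):
-- `for idx in mol: mol[idx] *= number`  — each key is overwritten with its value times n
def scaleVals (d : PySem.Dict (List Char) Int) (n : Int) : PySem.Dict (List Char) Int :=
  d.keys.foldl (fun d k => d.insert k (d.getD k 0 * n)) d

-- A's `for idx in formula[i+1:]` digit loop building `number` (None/str) and advancing i
def digitScanA : List Char → Option (List Char) → Int → Option (List Char) × Int
  | [], number, i => (number, i)
  | c :: rest, number, i =>
    if PySem.Chars.isdigit c then
      digitScanA rest (some ((match number with | none => [] | some s => s) ++ [c])) (i + 1)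
    else (number, i)

-- A's `for idx in formula[i:]` name loop (valor, name, i threaded exactly as in the source)
def nameScanA : List Char → Int → List Char → Int → List Char × Int
  | [], _, name, i => (name, i)
  | c :: rest, valor, name, i =>
    if PySem.Chars.isupper c ∧ valor ≠ 0 then nameScanA rest (valor - 1) [c] i
    else if PySem.Chars.islower c then nameScanA rest valor (name ++ [c]) (i + 1)
    else (name, i)

-- A's `for idx in second: ...` merge of the recursive result into mol
-- (iterating the items pairs is exact: dict keys are unique, second[idx] is the paired value)
def mergeA (mol second : PySem.Dict (List Char) Int) : PySem.Dict (List Char) Int :=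
  second.items.foldl
    (fun d p => if d.contains p.1 then d.insert p.1 (d.getD p.1 0 + p.2) else d.insert p.1 p.2)
    mol

-- A's while loop; state (i, mol, name, temporal) — `number` is None at every loop head.
-- The Nat argument is fuel, a pure totality guard: the wrapper passes one more than the
-- loop can ever iterate (the index strictly increases), so the 0 case is never reached.
-- Indexing uses toNat, exact for the nonnegative indices reachable under Pre_ (0 ≤ i).
def Aloop (L : List Char) : Nat → Int → PySem.Dict (List Char) Int → List Char → Int →
    PySem.Dict (List Char) Int × Int
  | 0, i, mol, _name, _temporal => (mol, i)
  | fuel + 1, i, mol, name, temporal =>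
    if i < (L.length : Int) then
      let it := L.getD i.toNat ' '
      if it = ')' ∨ it = ']' ∨ it = '}' then
        -- `if i + 1 < len(formula):` then the digit loop over formula[i+1:]
        let p := if i + 1 < (L.length : Int) then digitScanA (L.drop (i.toNat + 1)) none i
                 else (none, i)
        match p with
        | (none, i') => (mol, i')
        | (some ds, i') => (scaleVals mol ((PySem.Int.ofChars? ds).getD 0), i')
      else if it = '(' ∨ it = '[' ∨ it = '{' then
        match Aloop L fuel (i + 1) PySem.Dict.empty [] 0 with
        | (second, k) => Aloop L fuel (k + 1) (mergeA mol second) name temporal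
      else if PySem.Chars.isdigit it then
        let p := digitScanA (L.drop i.toNat) (some []) i   -- number = ''
        let num := (PySem.Int.ofChars? (match p.1 with | none => [] | some s => s)).getD 0
        let valor0 := num + mol.getD name 0
        let valor := if temporal = 1 then valor0 - 1 else valor0
        Aloop L fuel p.2 (mol.insert name valor) name 0    -- `continue`
      else
        let q := nameScanA (L.drop i.toNat) 1 name i
        Aloop L fuel (q.2 + 1) (mol.insert q.1 (mol.getD q.1 0 + 1)) q.1 1
    else (mol, i)

def parse_mol (formula : String) (i : Int) : (List (String × Int)) × Int :=
  let L := formula.toList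
  let r := Aloop L (((L.length : Int) - i).toNat + 1) i PySem.Dict.empty [] 0
  (r.1.items.map (fun p => (String.ofList p.1, p.2)), r.2)

-- ===== PORT B =====
-- B's merge: `parent[k] = parent.get(k, 0) + v` over child.items()
def mergeB (parent child : PySem.Dict (List Char) Int) : PySem.Dict (List Char) Int :=
  child.items.foldl (fun d p => d.insert p.1 (d.getD p.1 0 + p.2)) parent

-- B's `while j < n and formula[j].isdigit(): j += 1`
def scanDigitsEnd (L : List Char) (j : Int) : Int :=
  if h : j < (L.length : Int) ∧ PySem.Chars.isdigit (L.getD j.toNat ' ') then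
    scanDigitsEnd L (j + 1)
  else j
  termination_by ((L.length : Int) - j).toNat
  decreasing_by omega

-- B's name loop: scan position j, seen_upper flag, the collected pieces (joined at the end),
-- i advanced on lowercase only
def nameScanB (L : List Char) (j : Int) (seen : Bool) (parts : List (List Char)) (i : Int) :
    List Char × Int :=
  if hj : j < (L.length : Int) then
    let ch := L.getD j.toNat ' '
    if PySem.Chars.isupper ch ∧ seen = false then nameScanB L (j + 1) true [[ch]] i
    else if PySem.Chars.islower ch then nameScanB L (j + 1) seen (parts ++ [[ch]]) (i + 1)
    else (parts.flatten, i)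
  else (parts.flatten, i)
  termination_by ((L.length : Int) - j).toNat
  decreasing_by all_goals omega

-- B's final `while stack:` unwind loop
def unwindB : PySem.Dict (List Char) Int → Int → List (PySem.Dict (List Char) Int × List Char × Int) →
    PySem.Dict (List Char) Int × Int
  | mol, i, [] => (mol, i)
  | mol, i, (pm, _, _) :: rest => unwindB (mergeB pm mol) (i + 1) rest

-- B's main while loop over (i, mol, name, temporal, stack).
-- The Nat argument is fuel, a pure totality guard (i strictly increases every iteration);
-- the wrapper passes one more than the loop can iterate, so the 0 case is never reached.
def Bloop (L : List Char) : Nat → Int → PySem.Dict (List Char) Int → List Char → Int →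
    List (PySem.Dict (List Char) Int × List Char × Int) → PySem.Dict (List Char) Int × Int
  | 0, i, mol, _name, _temporal, _stack => (mol, i)
  | fuel + 1, i, mol, name, temporal, stack =>
    if i < (L.length : Int) then
      let c := L.getD i.toNat ' '
      if c = ')' ∨ c = ']' ∨ c = '}' then
        let j := scanDigitsEnd L (i + 1)
        let mi := if i + 1 < j then
            (scaleVals mol ((PySem.Int.ofChars? (PySem.List.slice L (some (i + 1)) (some j))).getD 0),
             j - 1)
          else (mol, i)
        match stack with
        | [] => mi
        | (pm, pn, pt) :: rest => Bloop L fuel (mi.2 + 1) (mergeB pm mi.1) pn pt rest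
      else if c = '(' ∨ c = '[' ∨ c = '{' then
        Bloop L fuel (i + 1) PySem.Dict.empty [] 0 ((mol, name, temporal) :: stack)
      else if PySem.Chars.isdigit c then
        let j := scanDigitsEnd L i
        let v0 := (PySem.Int.ofChars? (PySem.List.slice L (some i) (some j))).getD 0 + mol.getD name 0
        let v := if temporal = 1 then v0 - 1 else v0
        Bloop L fuel j (mol.insert name v) name 0 stack    -- `continue`
      else
        let q := nameScanB L i false [name] i
        Bloop L fuel (q.2 + 1) (mol.insert q.1 (mol.getD q.1 0 + 1)) q.1 1 stack
    else unwindB mol i stack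

def parse_mol_alt (formula : String) (i : Int) : (List (String × Int)) × Int :=
  let L := formula.toList
  let r := Bloop L (((L.length : Int) - i).toNat + 1) i PySem.Dict.empty [] 0 []
  (r.1.items.map (fun p => (String.ofList p.1, p.2)), r.2)

-- ===== PRECONDITION & SPEC =====
-- Pre_ excludes negative start indices i: for i < -len(formula) the Python A raises IndexError,
-- and for -len ≤ i < 0 A's value arises from Python's negative-index wraparound meeting its
-- suffix slices — an unspecified corner where B's index-based scan legitimately reads a
-- different digit run (both behaviours are accidents of representation, neither is specified).
def Pre_parse_mol (formula : String) (i : Int) : Prop := 0 ≤ i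
instance (formula : String) (i : Int) : Decidable (Pre_parse_mol formula i) := by
  unfold Pre_parse_mol; infer_instance
def pvWitness_parse_mol : String × Int := ("Mg(OH)2", 0)

def Spec_parse_mol (formula : String) (i : Int) (out : (List (String × Int)) × Int) : Prop :=
  out = parse_mol_alt formula i
instance (formula : String) (i : Int) (out : (List (String × Int)) × Int) :
    Decidable (Spec_parse_mol formula i out) := by unfold Spec_parse_mol; infer_instance

-- ===== CLAIM (what is proved, stated in full; the proofs are below) =====
def Claim_equal_parse_mol : Prop := ∀ (formula : String) (i : Int), Dom_parse_mol formula i →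
  Pre_parse_mol formula i → Spec_parse_mol formula i (parse_mol formula i)

-- ===== LEMMAS AND PROOFS =====

theorem digitScanA_le (cs : List Char) (number : Option (List Char)) (i : Int) :
    i ≤ (digitScanA cs number i).2 := by
  induction cs generalizing number i with
  | nil => simp [digitScanA]
  | cons c rest ih =>
    simp only [digitScanA]
    split
    · exact le_trans (by omega) (ih _ (i + 1))
    · simp

theorem nameScanA_le (cs : List Char) (valor : Int) (name : List Char) (i : Int) :
    i ≤ (nameScanA cs valor name i).2 := by
  induction cs generalizing valor name i with
  | nil => simp [nameScanA]
  | cons c rest ih =>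
    simp only [nameScanA]
    split
    · exact ih _ _ i
    · split
      · exact le_trans (by omega) (ih _ _ (i + 1))
      · simp

theorem merge_eq (d e : PySem.Dict (List Char) Int) : mergeA d e = mergeB d e := by
  unfold mergeA mergeB
  congr 1
  funext d p
  by_cases h : d.contains p.1
  · simp [h]
  · have hc : d.contains p.1 = false := by simpa using h
    rw [if_neg h, PySem.Dict.getD_of_not_contains _ _ hc, Int.zero_add]

-- A's unwinding of the recursion: after an inner level returns (m, i'), the parent merges
-- and continues its own loop at i' + 1 (with its own canonical fuel)
def unwindA (L : List Char) :
    PySem.Dict (List Char) Int × Int → List (PySem.Dict (List Char) Int × List Char × Int) →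
    PySem.Dict (List Char) Int × Int
  | r, [] => r
  | r, (pm, pn, pt) :: rest =>
    unwindA L (Aloop L (((L.length : Int) - (r.2 + 1)).toNat + 1) (r.2 + 1) (mergeA pm r.1) pn pt)
      rest

theorem digitScanA_some (cs : List Char) (acc : List Char) (i : Int) :
    digitScanA cs (some acc) i =
      (some (acc ++ cs.takeWhile PySem.Chars.isdigit),
       i + (cs.takeWhile PySem.Chars.isdigit).length) := by
  induction cs generalizing acc i with
  | nil => simp [digitScanA]
  | cons c rest ih =>
    by_cases h : PySem.Chars.isdigit c
    · simp [digitScanA, h, ih]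
      omega
    · simp [digitScanA, h]

theorem digitScanA_none (cs : List Char) (i : Int) :
    digitScanA cs none i =
      (if (cs.takeWhile PySem.Chars.isdigit) = [] then none
       else some (cs.takeWhile PySem.Chars.isdigit),
       i + (cs.takeWhile PySem.Chars.isdigit).length) := by
  cases cs with
  | nil => simp [digitScanA]
  | cons c rest =>
    by_cases h : PySem.Chars.isdigit c
    · simp [digitScanA, h, digitScanA_some]
      omega
    · simp [digitScanA, h]

-- a digit at position i makes the digit scan advance strictly
theorem digit_step (L : List Char) (i : Int) (hlen : i < (L.length : Int))
    (h3 : PySem.Chars.isdigit (L.getD i.toNat ' ') = true) :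
    i + 1 ≤ (digitScanA (L.drop i.toNat) (some []) i).2 := by
  by_cases hlt : i.toNat < L.length
  · have h1 : L.drop i.toNat = L.getD i.toNat ' ' :: L.drop (i.toNat + 1) := by
      rw [List.getD_eq_getElem L ' ' hlt, List.drop_eq_getElem_cons hlt]
    rw [h1]
    simp only [digitScanA, h3, if_true]
    exact digitScanA_le _ _ _
  · exfalso
    rw [List.getD_eq_default _ _ (by omega)] at h3
    exact absurd h3 (by decide)

theorem scanDigitsEnd_eq (L : List Char) (j : Int) (hj : 0 ≤ j) :
    scanDigitsEnd L j = j + ((L.drop j.toNat).takeWhile PySem.Chars.isdigit).length := by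
  fun_induction scanDigitsEnd L j with
  | case1 j h ih =>
    have hd : L.drop j.toNat = L.getD j.toNat ' ' :: L.drop (j.toNat + 1) := by
      rw [List.getD_eq_getElem L ' ' (by omega), List.drop_eq_getElem_cons (by omega)]
    have hj1 : (j + 1).toNat = j.toNat + 1 := by omega
    rw [ih (by omega), hd, List.takeWhile_cons, if_pos h.2, hj1]
    simp; omega
  | case2 j h =>
    by_cases hlen : j < (L.length : Int)
    · have hd : L.drop j.toNat = L.getD j.toNat ' ' :: L.drop (j.toNat + 1) := by
        rw [List.getD_eq_getElem L ' ' (by omega), List.drop_eq_getElem_cons (by omega)]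
      have hnd : ¬ PySem.Chars.isdigit (L.getD j.toNat ' ') = true := fun hc => h ⟨hlen, hc⟩
      rw [hd, List.takeWhile_cons, if_neg hnd]
      simp
    · have : L.drop j.toNat = [] := List.drop_eq_nil_of_le (by omega)
      rw [this]; simp

theorem take_length_takeWhile {α : Type} (p : α → Bool) (l : List α) :
    l.take (l.takeWhile p).length = l.takeWhile p :=
  (List.prefix_iff_eq_take.mp (List.takeWhile_prefix p)).symm

theorem slice_takeWhile (L : List Char) (a : Nat) :
    PySem.List.slice L (some (a : Int))
        (some ((a : Int) + (((L.drop a).takeWhile PySem.Chars.isdigit).length : Nat))) =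
      (L.drop a).takeWhile PySem.Chars.isdigit := by
  rw [PySem.List.slice_natCast_add, take_length_takeWhile]

theorem nameScan_eq (L : List Char) (j : Int) (hj : 0 ≤ j) (seen : Bool)
    (parts : List (List Char)) (i : Int) (valor : Int) (hv : valor = if seen then 0 else 1)
    (nm : List Char) (hname : nm = parts.flatten) :
    nameScanA (L.drop j.toNat) valor nm i = nameScanB L j seen parts i := by
  fun_induction nameScanB L j seen parts i generalizing valor nm with
  | case1 j seen parts i hlen ch hup ih =>
    obtain ⟨hu, hs⟩ := hup
    subst hs
    simp only [if_neg Bool.false_ne_true] at hv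
    have hd : L.drop j.toNat = L.getD j.toNat ' ' :: L.drop (j.toNat + 1) := by
      rw [List.getD_eq_getElem L ' ' (by omega), List.drop_eq_getElem_cons (by omega)]
    have hj1 : (j + 1).toNat = j.toNat + 1 := by omega
    rw [hd]
    show nameScanA _ _ _ _ = _
    simp only [nameScanA]
    rw [if_pos ⟨hu, by omega⟩, hv, show (1 : Int) - 1 = 0 from rfl, ← hj1]
    exact ih (by omega) 0 (by simp) [L.getD j.toNat ' ']
      (by simp only [List.flatten_cons, List.flatten_nil, List.append_nil]; rfl)
  | case2 j seen parts i hlen ch hup hlo ih =>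
    have hseen : PySem.Chars.isupper (L.getD j.toNat ' ') = true → valor = 0 := by
      intro hu
      cases seen with
      | false => exact absurd ⟨hu, rfl⟩ hup
      | true => simpa using hv
    have hd : L.drop j.toNat = L.getD j.toNat ' ' :: L.drop (j.toNat + 1) := by
      rw [List.getD_eq_getElem L ' ' (by omega), List.drop_eq_getElem_cons (by omega)]
    have hj1 : (j + 1).toNat = j.toNat + 1 := by omega
    rw [hd]
    show nameScanA _ _ _ _ = _
    simp only [nameScanA]
    rw [if_neg (fun hc => hc.2 (hseen hc.1)), if_pos hlo, ← hj1]
    exact ih (by omega) valor hv (nm ++ [L.getD j.toNat ' '])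
      (by simp only [List.flatten_append, List.flatten_cons, List.flatten_nil, List.append_nil,
        hname]; rfl)
  | case3 j seen parts i hlen ch hup hlo =>
    have hseen : PySem.Chars.isupper (L.getD j.toNat ' ') = true → valor = 0 := by
      intro hu
      cases seen with
      | false => exact absurd ⟨hu, rfl⟩ hup
      | true => simpa using hv
    have hd : L.drop j.toNat = L.getD j.toNat ' ' :: L.drop (j.toNat + 1) := by
      rw [List.getD_eq_getElem L ' ' (by omega), List.drop_eq_getElem_cons (by omega)]
    rw [hd]
    show nameScanA _ _ _ _ = _
    simp only [nameScanA]
    rw [if_neg (fun hc => hc.2 (hseen hc.1)), if_neg (by simpa using hlo), hname]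
  | case4 j seen parts i hlen =>
    have hnil : L.drop j.toNat = [] := List.drop_eq_nil_of_le (by omega)
    rw [hnil, hname]
    rfl

theorem Aloop_le (L : List Char) (fuel : Nat) : ∀ (i : Int) (mol : PySem.Dict (List Char) Int)
    (name : List Char) (temporal : Int), i ≤ (Aloop L fuel i mol name temporal).2 := by
  induction fuel with
  | zero => intro i mol name temporal; exact le_refl i
  | succ f ih =>
    intro i mol name temporal
    simp only [Aloop]
    by_cases hlen : i < (L.length : Int)
    · rw [if_pos hlen]
      by_cases h1 : L.getD i.toNat ' ' = ')' ∨ L.getD i.toNat ' ' = ']' ∨ L.getD i.toNat ' ' = '}'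
      · rw [if_pos h1]
        rcases hp : (if i + 1 < (L.length : Int) then digitScanA (L.drop (i.toNat + 1)) none i
            else (none, i)) with ⟨onum, i'⟩
        have h5 : i ≤ i' := by
          by_cases hc : i + 1 < (L.length : Int)
          · rw [if_pos hc] at hp
            have h6 := digitScanA_le (L.drop (i.toNat + 1)) none i
            rw [hp] at h6
            exact h6
          · rw [if_neg hc] at hp
            cases hp
            exact le_refl i
        cases onum with
        | none => simpa using h5
        | some ds => simpa using h5
      · rw [if_neg h1]
        by_cases h2 : L.getD i.toNat ' ' = '(' ∨ L.getD i.toNat ' ' = '[' ∨ L.getD i.toNat ' ' = '{'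
        · rw [if_pos h2]
          rcases hAk : Aloop L f (i + 1) PySem.Dict.empty [] 0 with ⟨second, k⟩
          have hk := ih (i + 1) PySem.Dict.empty [] 0
          rw [hAk] at hk
          simp only at hk
          show i ≤ (Aloop L f (k + 1) (mergeA mol second) name temporal).2
          exact le_trans (by omega) (ih (k + 1) _ _ _)
        · rw [if_neg h2]
          by_cases h3 : PySem.Chars.isdigit (L.getD i.toNat ' ') = true
          · rw [if_pos h3]
            exact le_trans (digitScanA_le _ _ _) (ih _ _ _ _)
          · rw [if_neg h3]
            have h5 := nameScanA_le (L.drop i.toNat) 1 name i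
            exact le_trans (by omega) (ih _ _ _ _)
    · rw [if_neg hlen]

-- the fuel is a pure guard: any two sufficient fuels give the same run of A's loop
theorem Aloop_fi (L : List Char) : ∀ (f1 f2 : Nat) (i : Int) (mol : PySem.Dict (List Char) Int)
    (name : List Char) (temporal : Int),
    ((L.length : Int) - i).toNat < f1 → ((L.length : Int) - i).toNat < f2 →
    Aloop L f1 i mol name temporal = Aloop L f2 i mol name temporal := by
  intro f1
  induction f1 with
  | zero => intro f2 i mol name temporal hf1 hf2; exact absurd hf1 (Nat.not_lt_zero _)
  | succ f ih =>
    intro f2 i mol name temporal hf1 hf2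
    cases f2 with
    | zero => exact absurd hf2 (Nat.not_lt_zero _)
    | succ g =>
    simp only [Aloop]
    by_cases hlen : i < (L.length : Int)
    · rw [if_pos hlen, if_pos hlen]
      by_cases h1 : L.getD i.toNat ' ' = ')' ∨ L.getD i.toNat ' ' = ']' ∨ L.getD i.toNat ' ' = '}'
      · rw [if_pos h1, if_pos h1]
      · rw [if_neg h1, if_neg h1]
        by_cases h2 : L.getD i.toNat ' ' = '(' ∨ L.getD i.toNat ' ' = '[' ∨ L.getD i.toNat ' ' = '{'
        · rw [if_pos h2, if_pos h2]
          have hin : Aloop L f (i + 1) PySem.Dict.empty [] 0 =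
              Aloop L g (i + 1) PySem.Dict.empty [] 0 := ih g (i + 1) _ _ _ (by omega) (by omega)
          rw [hin]
          rcases hAk : Aloop L g (i + 1) PySem.Dict.empty [] 0 with ⟨second, k⟩
          have hk := Aloop_le L g (i + 1) PySem.Dict.empty [] 0
          rw [hAk] at hk
          simp only at hk
          show Aloop L f (k + 1) (mergeA mol second) name temporal =
            Aloop L g (k + 1) (mergeA mol second) name temporal
          exact ih g (k + 1) _ _ _ (by omega) (by omega)
        · rw [if_neg h2, if_neg h2]
          by_cases h3 : PySem.Chars.isdigit (L.getD i.toNat ' ') = true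
          · rw [if_pos h3, if_pos h3]
            have h5 := digit_step L i hlen h3
            exact ih g _ _ _ _ (by omega) (by omega)
          · rw [if_neg h3, if_neg h3]
            have h5 := nameScanA_le (L.drop i.toNat) 1 name i
            exact ih g _ _ _ _ (by omega) (by omega)
    · rw [if_neg hlen, if_neg hlen]

theorem unwind_eq (L : List Char) (mol : PySem.Dict (List Char) Int) (i : Int)
    (hi : (L.length : Int) ≤ i)
    (stack : List (PySem.Dict (List Char) Int × List Char × Int)) :
    unwindB mol i stack = unwindA L (mol, i) stack := by
  induction stack generalizing mol i with
  | nil => rfl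
  | cons f rest ih =>
    obtain ⟨pm, pn, pt⟩ := f
    show unwindB (mergeB pm mol) (i + 1) rest =
      unwindA L (Aloop L (((L.length : Int) - (i + 1)).toNat + 1) (i + 1) (mergeA pm mol) pn pt)
        rest
    simp only [Aloop]
    rw [if_neg (by omega), merge_eq, ih _ _ (by omega)]

theorem main_eq (L : List Char) (n : Nat) : ∀ (fa fb : Nat) (i : Int)
    (mol : PySem.Dict (List Char) Int) (name : List Char) (temporal : Int)
    (stack : List (PySem.Dict (List Char) Int × List Char × Int)),
    0 ≤ i → ((L.length : Int) - i).toNat ≤ n →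
    ((L.length : Int) - i).toNat < fa → ((L.length : Int) - i).toNat < fb →
    Bloop L fb i mol name temporal stack = unwindA L (Aloop L fa i mol name temporal) stack := by
  induction n using Nat.strong_induction_on with
  | _ n IH =>
  intro fa fb i mol name temporal stack hi hn hfa hfb
  obtain ⟨fa', rfl⟩ : ∃ k, fa = k + 1 := ⟨fa - 1, by omega⟩
  obtain ⟨fb', rfl⟩ : ∃ k, fb = k + 1 := ⟨fb - 1, by omega⟩
  by_cases hlen : i < (L.length : Int)
  case neg =>
    simp only [Bloop, Aloop]
    rw [if_neg hlen, if_neg hlen]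
    exact unwind_eq L mol i (by omega) stack
  case pos =>
  simp only [Bloop, Aloop]
  rw [if_pos hlen, if_pos hlen]
  have htoNat : i.toNat < L.length := by omega
  by_cases h1 : L.getD i.toNat ' ' = ')' ∨ L.getD i.toNat ' ' = ']' ∨ L.getD i.toNat ' ' = '}'
  · -- closing bracket
    rw [if_pos h1, if_pos h1]
    set tw := (L.drop (i.toNat + 1)).takeWhile PySem.Chars.isdigit with htw
    have hj : scanDigitsEnd L (i + 1) = i + 1 + (tw.length : Int) := by
      rw [scanDigitsEnd_eq L (i + 1) (by omega), show (i + 1).toNat = i.toNat + 1 from by omega,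
        ← htw]
    have hA : (if i + 1 < (L.length : Int) then digitScanA (L.drop (i.toNat + 1)) none i
        else (none, i)) =
        (if tw = [] then none else some tw, i + (tw.length : Int)) := by
      by_cases hc : i + 1 < (L.length : Int)
      · rw [if_pos hc, digitScanA_none, ← htw]
      · have hd0 : L.drop (i.toNat + 1) = [] := List.drop_eq_nil_of_le (by omega)
        rw [if_neg hc, htw, hd0]
        simp
    by_cases htw0 : tw = []
    · -- no multiplier digits after the bracket
      simp only [hA, hj, htw0, List.length_nil, Nat.cast_zero, Int.add_zero, lt_self_iff_false,
        if_false]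
      match stack with
      | [] => rfl
      | (pm, pn, pt) :: rest =>
        show Bloop L fb' (i + 1) (mergeB pm mol) pn pt rest = unwindA L (mol, i) ((pm, pn, pt) :: rest)
        show Bloop L fb' (i + 1) (mergeB pm mol) pn pt rest =
          unwindA L (Aloop L (((L.length : Int) - (i + 1)).toNat + 1) (i + 1) (mergeA pm mol) pn pt)
            rest
        rw [merge_eq]
        exact IH ((L.length : Int) - (i + 1)).toNat (by omega) _ _ _ _ _ _ _ (by omega) (by omega)
          (by omega) (by omega)
    · -- multiplier digits present
      have hlen0 : 0 < tw.length := List.length_pos_iff.mpr htw0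
      have hsl : PySem.List.slice L (some (i + 1)) (some (i + 1 + (tw.length : Int))) = tw := by
        rw [htw, show i + 1 = ((i.toNat + 1 : Nat) : Int) from by omega]
        exact slice_takeWhile L (i.toNat + 1)
      have hi2 : i + 1 + (tw.length : Int) - 1 = i + (tw.length : Int) := by omega
      have hcc : i + 1 < i + 1 + (tw.length : Int) := by omega
      simp only [hA, hj, hsl, hi2, if_neg htw0, if_pos hcc]
      match stack with
      | [] => rfl
      | (pm, pn, pt) :: rest =>
        show Bloop L fb' (i + (tw.length : Int) + 1)
            (mergeB pm (scaleVals mol ((PySem.Int.ofChars? tw).getD 0))) pn pt rest =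
          unwindA L (scaleVals mol ((PySem.Int.ofChars? tw).getD 0), i + (tw.length : Int))
            ((pm, pn, pt) :: rest)
        show Bloop L fb' (i + (tw.length : Int) + 1)
            (mergeB pm (scaleVals mol ((PySem.Int.ofChars? tw).getD 0))) pn pt rest =
          unwindA L (Aloop L (((L.length : Int) - (i + (tw.length : Int) + 1)).toNat + 1)
            (i + (tw.length : Int) + 1)
            (mergeA pm (scaleVals mol ((PySem.Int.ofChars? tw).getD 0))) pn pt) rest
        rw [merge_eq]
        exact IH ((L.length : Int) - (i + (tw.length : Int) + 1)).toNat (by omega) _ _ _ _ _ _ _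
          (by omega) (by omega) (by omega) (by omega)
  · rw [if_neg h1, if_neg h1]
    by_cases h2 : L.getD i.toNat ' ' = '(' ∨ L.getD i.toNat ' ' = '[' ∨ L.getD i.toNat ' ' = '{'
    · -- opening bracket
      rw [if_pos h2, if_pos h2]
      have hstep := IH ((L.length : Int) - (i + 1)).toNat (by omega) fa' fb' (i + 1)
        PySem.Dict.empty [] 0 ((mol, name, temporal) :: stack) (by omega) (by omega) (by omega)
        (by omega)
      rw [hstep]
      rcases hAk : Aloop L fa' (i + 1) PySem.Dict.empty [] 0 with ⟨second, k⟩
      have hk := Aloop_le L fa' (i + 1) PySem.Dict.empty [] 0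
      rw [hAk] at hk
      simp only at hk
      show unwindA L (Aloop L (((L.length : Int) - (k + 1)).toNat + 1) (k + 1)
          (mergeA mol second) name temporal) stack = _
      have hfi : Aloop L (((L.length : Int) - (k + 1)).toNat + 1) (k + 1)
          (mergeA mol second) name temporal =
          Aloop L fa' (k + 1) (mergeA mol second) name temporal :=
        Aloop_fi L _ _ _ _ _ _ (by omega) (by omega)
      rw [hfi]
    · rw [if_neg h2, if_neg h2]
      by_cases h3 : PySem.Chars.isdigit (L.getD i.toNat ' ') = true
      · -- digit run
        rw [if_pos h3, if_pos h3]
        set tw := (L.drop i.toNat).takeWhile PySem.Chars.isdigit with htw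
        have hdrop : L.drop i.toNat = L.getD i.toNat ' ' :: L.drop (i.toNat + 1) := by
          rw [List.getD_eq_getElem L ' ' htoNat, List.drop_eq_getElem_cons htoNat]
        have hlen0 : 0 < tw.length := by
          rw [htw, hdrop, List.takeWhile_cons, if_pos h3]
          simp
        have hj : scanDigitsEnd L i = i + (tw.length : Int) := by
          rw [scanDigitsEnd_eq L i hi, ← htw]
        have hsl : PySem.List.slice L (some i) (some (i + (tw.length : Int))) = tw := by
          rw [htw, show i = ((i.toNat : Nat) : Int) from by omega]
          exact slice_takeWhile L i.toNat
        have hA : digitScanA (L.drop i.toNat) (some []) i = (some tw, i + (tw.length : Int)) := by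
          rw [digitScanA_some, ← htw]
          simp
        simp only [hj, hA, hsl]
        exact IH ((L.length : Int) - (i + (tw.length : Int))).toNat (by omega) _ _ _ _ _ _ _
          (by omega) (by omega) (by omega) (by omega)
      · -- name
        rw [if_neg h3, if_neg h3]
        rw [← nameScan_eq L i hi false [name] i 1 (by simp) name (by simp)]
        have hle := nameScanA_le (L.drop i.toNat) 1 name i
        exact IH ((L.length : Int) - ((nameScanA (L.drop i.toNat) 1 name i).2 + 1)).toNat
          (by omega) _ _ _ _ _ _ _ (by omega) (by omega) (by omega) (by omega)

-- ===== VERDICT (by name: the statement is the Claim_ definition above) =====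
theorem parse_mol_spec : Claim_equal_parse_mol := by
  intro formula i _ hpre
  unfold Spec_parse_mol parse_mol parse_mol_alt
  have h := main_eq formula.toList (((formula.toList.length : Int) - i).toNat)
    ((((formula.toList.length : Int) - i).toNat) + 1)
    ((((formula.toList.length : Int) - i).toNat) + 1) i
    PySem.Dict.empty [] 0 [] hpre le_rfl (by omega) (by omega)
  simp only [h, unwindA]
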